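-- pv_equiv track=rewrite | github.com/Adafede/adafede.github.io | scripts/services/cito_service.py | merge_citations
-- ===== SOURCE A (Python) =====
-- def merge_citations(
--
--     cito_dicts: list[dict[str, set[str]]],
-- ) -> dict[str, set[str]]:
--     """Merge multiple citation dictionaries.
--
--     Args:
--         cito_dicts: List of citation dictionaries
--
--     Returns:
--         Merged dictionary with all unique citations
--     """
--     from collections import defaultdict
--
--     merged: dict[str, set[str]] = defaultdict(set)
--
--     for cito_dict in cito_dicts:
--         for cite_id, properties in cito_dict.items():
--             merged[cite_id].update(properties)
--
--     return dict(merged)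
-- ===== SOURCE B (Python) =====
-- def merge_citations(cito_dicts):
--     """Merge multiple citation dictionaries (key-universe first, then union per key)."""
--     keys = dict.fromkeys(k for d in cito_dicts for k in d)
--     return {k: set().union(*(d.get(k, ()) for d in cito_dicts)) for k in keys}
-- ===== Notes on version B (the rewrite author's own statement) =====
-- stated objective: alternative
-- what changed: A makes one pass over the dicts updating a defaultdict per item; B first computes the key universe (dict.fromkeys) and then builds each key's merged set by unioning that key's entry across all dicts in a dict comprehension.
import Mathlib
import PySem

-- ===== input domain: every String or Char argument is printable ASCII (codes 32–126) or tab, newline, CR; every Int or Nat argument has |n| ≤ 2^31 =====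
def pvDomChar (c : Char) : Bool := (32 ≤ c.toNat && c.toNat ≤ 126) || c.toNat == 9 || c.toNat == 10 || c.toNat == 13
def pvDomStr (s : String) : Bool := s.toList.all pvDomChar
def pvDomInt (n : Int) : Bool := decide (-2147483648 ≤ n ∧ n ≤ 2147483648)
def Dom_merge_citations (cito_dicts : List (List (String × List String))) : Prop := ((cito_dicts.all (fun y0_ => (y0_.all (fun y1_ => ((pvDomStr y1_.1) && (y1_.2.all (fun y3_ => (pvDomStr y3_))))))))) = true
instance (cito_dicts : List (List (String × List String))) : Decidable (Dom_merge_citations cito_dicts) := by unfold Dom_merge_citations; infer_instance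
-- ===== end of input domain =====

-- B inverts A's single dict-by-dict pass: it computes the key universe first and then unions each
-- key's entry across all dicts (objective: alternative decomposition, same results).

-- ===== PORT A =====
-- for cito_dict in cito_dicts: for cite_id, properties in items: merged[cite_id].update(properties)
-- (defaultdict(set): merged[k] defaults to the empty set); dict(merged) = .items
def merge_citations (cito_dicts : List (List (String × List String))) : List (String × List String) :=
  (cito_dicts.foldl
    (fun merged cito_dict =>
      cito_dict.foldl
        (fun merged kv =>
          merged.modify kv.1 PySem.Set.empty (fun s => PySem.Set.update s kv.2))
        merged)
    PySem.Dict.empty).items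

-- ===== PORT B =====
-- keys = dict.fromkeys(k for d in cito_dicts for k in d)  (ordered dedup = PySem.List.dedup)
-- {k: set().union(*(d.get(k, ()) for d in cito_dicts)) for k in keys}
def merge_citations_alt (cito_dicts : List (List (String × List String))) : List (String × List String) :=
  let keys := PySem.List.dedup (cito_dicts.flatMap (fun d => d.map Prod.fst))
  keys.map (fun k =>
    (k, cito_dicts.foldl
          (fun s d => PySem.Set.update s ((List.lookup k d).getD PySem.Set.empty))
          PySem.Set.empty))

-- ===== PRECONDITION & SPEC =====
-- Pre_ only excludes association lists in which one inner "dict" has a duplicate key: such a value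
-- represents no Python dict, so no Python input is excluded.
def Pre_merge_citations (cito_dicts : List (List (String × List String))) : Prop :=
  ∀ d ∈ cito_dicts, (d.map Prod.fst).Nodup
instance (cito_dicts : List (List (String × List String))) : Decidable (Pre_merge_citations cito_dicts) := by unfold Pre_merge_citations; infer_instance
def pvWitness_merge_citations : (List (List (String × List String))) :=
  [[("a", ["x"]), ("b", [])], [("a", ["y"])]]

def Spec_merge_citations (cito_dicts : List (List (String × List String))) (out : List (String × List String)) : Prop := out = merge_citations_alt cito_dicts
instance (cito_dicts : List (List (String × List String))) (out : List (String × List String)) : Decidable (Spec_merge_citations cito_dicts out) := by unfold Spec_merge_citations; infer_instance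

-- ===== CLAIM (what is proved, stated in full; the proofs are below) =====
def Claim_equal_merge_citations : Prop := ∀ (cito_dicts : List (List (String × List String))), Dom_merge_citations cito_dicts → Pre_merge_citations cito_dicts → Spec_merge_citations cito_dicts (merge_citations cito_dicts)

-- ===== LEMMAS AND PROOFS =====

-- A's inner loop body, named for the proofs (definitionally the lambda in the port of A)
def pvStep (m : PySem.Dict String (List String)) (kv : String × List String) : PySem.Dict String (List String) :=
  m.modify kv.1 PySem.Set.empty (fun s => PySem.Set.update s kv.2)

lemma pvLookup_eq_none {β : Type} (k : String) (l : List (String × β))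
    (h : k ∉ l.map Prod.fst) : List.lookup k l = none := by
  induction l with
  | nil => rfl
  | cons p rest ih =>
    simp only [List.map_cons, List.mem_cons, not_or] at h
    cases p with
    | mk k0 v0 =>
      simp only [List.lookup_cons]
      have : (k == k0) = false := by simpa [beq_iff_eq] using h.1
      rw [this]
      exact ih h.2

-- Folding ONE dict d into a map-shaped accumulator: keys grow by d's keys (set update),
-- each key's set grows by d's entry for it (first-match lookup, empty if absent).
lemma pv_items_fold_one (d : List (String × List String)) :
    ∀ (K : List String) (G : String → List String) (m : PySem.Dict String (List String)),
    (d.map Prod.fst).Nodup → K.Nodup →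
    m.items = K.map (fun k => (k, G k)) →
    (∀ k, k ∉ K → G k = []) →
    (d.foldl pvStep m).items
      = (PySem.Set.update K (d.map Prod.fst)).map
          (fun k => (k, PySem.Set.update (G k) ((List.lookup k d).getD []))) := by
  induction d with
  | nil =>
    intro K G m _ _ hm _
    simp [PySem.Set.update, hm]
  | cons kv rest ih =>
    intro K G m hnd hK hm hG
    obtain ⟨k0, v0⟩ := kv
    simp only [List.map_cons, List.nodup_cons] at hnd
    obtain ⟨hk0, hrest⟩ := hnd
    have hkeys : m.keys = K := by
      simp [PySem.Dict.keys, hm, Function.comp_def]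
    -- items of the one-step-updated dict
    have hstep : (pvStep m (k0, v0)).items
        = (PySem.Set.add K k0).map
            (fun k => (k, if k = k0 then PySem.Set.update (G k) v0 else G k)) := by
      show (m.insert k0 (PySem.Set.update (m.getD k0 PySem.Set.empty) v0)).items = _
      by_cases hmem : k0 ∈ K
      · have hcont : m.contains k0 = true := by
          rw [PySem.Dict.contains_iff_mem_keys, hkeys]; exact hmem
        have hget : m.getD k0 PySem.Set.empty = G k0 := by
          apply PySem.Dict.getD_of_mem_items
          · rw [hm]; exact List.mem_map_of_mem hmem
          · rw [hkeys]; exact hK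
        have hadd : PySem.Set.add K k0 = K := by
          simp [PySem.Set.add, hmem]
        rw [PySem.Dict.items_insert, if_pos hcont, hget, hadd, hm, List.map_map]
        apply List.map_congr_left
        intro k _
        by_cases hk : k = k0 <;> simp [Function.comp, hk, beq_iff_eq]
      · have hcont : m.contains k0 = false := by
          rw [PySem.Dict.contains_eq_decide_mem_keys, hkeys]
          simpa using hmem
        have hget : m.getD k0 PySem.Set.empty = PySem.Set.empty := by
          exact PySem.Dict.getD_of_not_contains _ _ hcont
        have hadd : PySem.Set.add K k0 = K ++ [k0] := by
          simp only [PySem.Set.add]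
          rw [if_neg]
          simp [hmem]
        rw [PySem.Dict.items_insert, if_neg (by simp [hcont]), hget, hadd, hm, List.map_append]
        congr 1
        · apply List.map_congr_left
          intro k hk
          have : k ≠ k0 := fun h => hmem (h ▸ hk)
          simp [this]
        · simp [PySem.Set.empty, hG k0 hmem]
    have hK' : (PySem.Set.add K k0).Nodup := PySem.Set.nodup_add K k0 hK
    have hG' : ∀ k, k ∉ PySem.Set.add K k0 →
        (if k = k0 then PySem.Set.update (G k) v0 else G k) = [] := by
      intro k hk
      rw [PySem.Set.mem_add] at hk
      push Not at hk
      rw [if_neg hk.2]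
      exact hG k hk.1
    have := ih (PySem.Set.add K k0)
      (fun k => if k = k0 then PySem.Set.update (G k) v0 else G k)
      (pvStep m (k0, v0)) hrest hK' hstep hG'
    simp only [List.foldl_cons]
    rw [this]
    have hkeyfold : PySem.Set.update K (k0 :: rest.map Prod.fst)
        = PySem.Set.update (PySem.Set.add K k0) (rest.map Prod.fst) := rfl
    rw [← hkeyfold]
    apply List.map_congr_left
    intro k _
    by_cases hk : k = k0
    · subst hk
      have hnone : List.lookup k rest = none := pvLookup_eq_none k rest hk0
      simp [hnone, PySem.Set.update]
    · have : (k == k0) = false := by simpa [beq_iff_eq] using hk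
      simp [List.lookup_cons, this, hk]

-- Chaining over all dicts: A's nested fold, in map form, with B's key fold and per-key value folds.
lemma pv_items_fold_all (ds : List (List (String × List String))) :
    ∀ (K : List String) (G : String → List String) (m : PySem.Dict String (List String)),
    (∀ d ∈ ds, (d.map Prod.fst).Nodup) → K.Nodup →
    m.items = K.map (fun k => (k, G k)) →
    (∀ k, k ∉ K → G k = []) →
    (ds.foldl (fun m d => d.foldl pvStep m) m).items
      = (ds.foldl (fun K d => PySem.Set.update K (d.map Prod.fst)) K).map
          (fun k => (k, ds.foldl
            (fun s d => PySem.Set.update s ((List.lookup k d).getD [])) (G k))) := by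
  induction ds with
  | nil => intro K G m _ _ hm _; simpa using hm
  | cons d rest ih =>
    intro K G m hnd hK hm hG
    have hd := hnd d (List.mem_cons_self)
    have hstep := pv_items_fold_one d K G m hd hK hm hG
    have hK' : (PySem.Set.update K (d.map Prod.fst)).Nodup :=
      PySem.Set.nodup_update K _ hK
    have hG' : ∀ k, k ∉ PySem.Set.update K (d.map Prod.fst) →
        PySem.Set.update (G k) ((List.lookup k d).getD []) = [] := by
      intro k hk
      rw [PySem.Set.mem_update] at hk
      push Not at hk
      rw [pvLookup_eq_none k d hk.2, hG k hk.1]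
      rfl
    have := ih (PySem.Set.update K (d.map Prod.fst))
      (fun k => PySem.Set.update (G k) ((List.lookup k d).getD []))
      (d.foldl pvStep m) (fun d' hd' => hnd d' (List.mem_cons_of_mem _ hd')) hK' hstep hG'
    simpa using this

-- ===== VERDICT (by name: the statement is the Claim_ definition above) =====
theorem merge_citations_spec : Claim_equal_merge_citations := by
  intro ds _ hpre
  unfold Spec_merge_citations
  have hA : merge_citations ds
      = (ds.foldl (fun m d => d.foldl pvStep m) PySem.Dict.empty).items := rfl
  rw [hA, pv_items_fold_all ds [] (fun _ => []) PySem.Dict.empty hpre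
    List.nodup_nil (by rfl) (fun _ _ => rfl)]
  unfold merge_citations_alt
  have hkeys : ds.foldl (fun K d => PySem.Set.update K (d.map Prod.fst)) []
      = PySem.List.dedup (ds.flatMap (fun d => d.map Prod.fst)) := by
    rw [PySem.List.dedup_eq_ofList, PySem.Set.ofList_eq_foldl]
    rw [List.flatMap_def, List.foldl_flatten, List.foldl_map]
    rfl
  rw [hkeys]
  rfl
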